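-- pv_equiv track=rewrite | github.com/TheLostLeo/colon-disease-segmentation | scripts/clean_dataset.py | build_class_mapping
-- ===== SOURCE A (Python) =====
-- from typing import Dict, List
--
-- KNOWN_CLASS_ORDER = [
--     "Adenocarcinoma",
--     "High-grade IN",
--     "Low-grade IN",
--     "Normal",
--     "Polyp",
--     "Serrated adenoma",
-- ]
--
-- def build_class_mapping(class_names: List[str]) -> Dict[str, int]:
--     mapping: Dict[str, int] = {}
--
--     next_id = 1
--     for class_name in KNOWN_CLASS_ORDER:
--         if class_name in class_names:
--             mapping[class_name] = next_id
--             next_id += 1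
--
--     for class_name in class_names:
--         if class_name not in mapping:
--             mapping[class_name] = next_id
--             next_id += 1
--
--     return mapping
-- ===== SOURCE B (Python) =====
-- KNOWN_CLASS_ORDER = [
--     "Adenocarcinoma",
--     "High-grade IN",
--     "Low-grade IN",
--     "Normal",
--     "Polyp",
--     "Serrated adenoma",
-- ]
--
-- def _order_key(name):
--     try:
--         return KNOWN_CLASS_ORDER.index(name)
--     except ValueError:
--         return len(KNOWN_CLASS_ORDER)
--
-- def build_class_mapping(class_names):
--     ordered = sorted(dict.fromkeys(class_names), key=_order_key)
--     return {name: i for i, name in enumerate(ordered, start=1)}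
-- ===== Notes on version B (the rewrite author's own statement) =====
-- stated objective: idiomatic
-- what changed: B replaces A's two dict-populating loops with counter threading by a stable sort: dedup the input preserving first appearance, stable-sort by each name's index in KNOWN_CLASS_ORDER (len for unknowns), and assign ids in one enumerate pass.
import Mathlib
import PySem

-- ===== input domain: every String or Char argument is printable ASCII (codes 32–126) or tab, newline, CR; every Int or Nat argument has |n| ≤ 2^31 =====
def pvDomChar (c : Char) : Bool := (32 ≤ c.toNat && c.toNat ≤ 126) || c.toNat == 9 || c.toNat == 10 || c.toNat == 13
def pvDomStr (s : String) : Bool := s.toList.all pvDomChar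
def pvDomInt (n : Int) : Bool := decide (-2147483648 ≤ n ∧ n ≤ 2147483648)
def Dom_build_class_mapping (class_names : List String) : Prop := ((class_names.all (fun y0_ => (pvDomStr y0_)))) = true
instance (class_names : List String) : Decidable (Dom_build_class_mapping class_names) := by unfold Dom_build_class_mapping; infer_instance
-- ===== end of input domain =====

-- B replaces A's two dict-populating loops by dedup + one stable sort on a known-index key + one enumerate pass (objective: idiomatic).

def KNOWN_CLASS_ORDER : List String :=
  ["Adenocarcinoma", "High-grade IN", "Low-grade IN", "Normal", "Polyp", "Serrated adenoma"]

-- ===== PORT A =====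
def build_class_mapping (class_names : List String) : List (String × Int) :=
  let s1 := KNOWN_CLASS_ORDER.foldl
    (fun (st : PySem.Dict String Int × Int) class_name =>
      if class_names.contains class_name then (st.1.insert class_name st.2, st.2 + 1) else st)
    (PySem.Dict.empty, 1)
  let s2 := class_names.foldl
    (fun (st : PySem.Dict String Int × Int) class_name =>
      if !(st.1.contains class_name) then (st.1.insert class_name st.2, st.2 + 1) else st)
    s1
  s2.1.items

-- ===== PORT B =====
-- Source B's _order_key: KNOWN_CLASS_ORDER.index(name), or len(KNOWN_CLASS_ORDER) on ValueError
def order_key (name : String) : Int :=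
  match PySem.List.index? KNOWN_CLASS_ORDER name with
  | some k => (k : Int)
  | none => 6

def build_class_mapping_alt (class_names : List String) : List (String × Int) :=
  let ordered := PySem.List.sorted (PySem.List.dedup class_names) order_key
  (PySem.List.enumerate ordered 1).map (fun p => (p.2, p.1))

-- ===== PRECONDITION & SPEC =====
def Spec_build_class_mapping (class_names : List String) (out : List (String × Int)) : Prop := out = build_class_mapping_alt class_names
instance (class_names : List String) (out : List (String × Int)) : Decidable (Spec_build_class_mapping class_names out) := by unfold Spec_build_class_mapping; infer_instance

-- ===== CLAIM (what is proved, stated in full; the proofs are below) =====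
def Claim_equal_build_class_mapping : Prop := ∀ (class_names : List String), Dom_build_class_mapping class_names → Spec_build_class_mapping class_names (build_class_mapping class_names)

-- ===== LEMMAS AND PROOFS =====

-- pair each name with its 1-based id, as B's enumerate pass does
def addIds (xs : List String) (s : Int) : List (String × Int) :=
  (PySem.List.enumerate xs s).map (fun p => (p.2, p.1))

theorem addIds_nil (s : Int) : addIds [] s = [] := rfl

theorem addIds_cons (x : String) (xs : List String) (s : Int) :
    addIds (x :: xs) s = (x, s) :: addIds xs (s + 1) := by
  simp [addIds, PySem.List.enumerate_cons]

theorem map_fst_addIds (xs : List String) (s : Int) :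
    (addIds xs s).map (·.1) = xs := by
  simp [addIds, Function.comp_def]

-- the names phase 2 of A appends, given the key list of the dict so far
def extNew (ks : List String) : List String → List String
  | [] => []
  | n :: rest => if ks.contains n then extNew ks rest else n :: extNew (ks ++ [n]) rest

-- the unknown names kept in appearance order, tracked with an all-names seen list
def newUnknown (seen : List String) : List String → List String
  | [] => []
  | n :: rest =>
    if seen.contains n then newUnknown seen rest
    else if KNOWN_CLASS_ORDER.contains n then newUnknown (seen ++ [n]) rest
    else n :: newUnknown (seen ++ [n]) rest

theorem phase1 (cn : List String) :
    ∀ (ks : List String) (d : PySem.Dict String Int) (id : Int), ks.Nodup →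
      (∀ k ∈ ks, d.contains k = false) →
      ks.foldl
        (fun (st : PySem.Dict String Int × Int) k =>
          if cn.contains k then (st.1.insert k st.2, st.2 + 1) else st)
        (d, id)
      = (PySem.Dict.mk (d.items ++ addIds (ks.filter (fun k => cn.contains k)) id),
         id + (ks.filter (fun k => cn.contains k)).length) := by
  intro ks
  induction ks with
  | nil => intro d id _ _; simp [addIds_nil]
  | cons k rest ih =>
    intro d id hnd hfree
    rw [List.foldl_cons]
    by_cases hc : cn.contains k = true
    · have hdk : d.contains k = false := hfree k (by simp)
      have hins : d.insert k id = PySem.Dict.mk (d.items ++ [(k, id)]) := by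
        apply PySem.Dict.ext
        simp [PySem.Dict.items_insert, hdk]
      rw [if_pos hc]
      have hfree' : ∀ m ∈ rest, (d.insert k id).contains m = false := by
        intro m hm
        have hmk : m ≠ k := by
          rintro rfl; exact (List.nodup_cons.mp hnd).1 hm
        rw [PySem.Dict.contains_insert]
        simp [hmk, hfree m (List.mem_cons_of_mem _ hm)]
      rw [ih (d.insert k id) (id + 1) (List.nodup_cons.mp hnd).2 hfree']
      rw [hins]
      simp only [List.filter_cons, hc, if_pos, addIds_cons, Prod.mk.injEq]
      refine ⟨by simp, by simp only [List.length_cons]; push_cast; omega⟩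
    · rw [if_neg hc]
      rw [ih d id (List.nodup_cons.mp hnd).2 (fun m hm => hfree m (List.mem_cons_of_mem _ hm))]
      have hk' : k ∉ cn := by simpa using hc
      simp [hk']

theorem phase2 :
    ∀ (cs : List String) (d : PySem.Dict String Int) (id : Int),
      cs.foldl
        (fun (st : PySem.Dict String Int × Int) n =>
          if !(st.1.contains n) then (st.1.insert n st.2, st.2 + 1) else st)
        (d, id)
      = (PySem.Dict.mk (d.items ++ addIds (extNew d.keys cs) id),
         id + (extNew d.keys cs).length) := by
  intro cs
  induction cs with
  | nil => intro d id; simp [extNew, addIds_nil]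
  | cons n rest ih =>
    intro d id
    rw [List.foldl_cons]
    by_cases hc : d.contains n = true
    · have hm : n ∈ d.keys := (PySem.Dict.contains_iff_mem_keys d n).mp hc
      rw [if_neg (by simp [hc])]
      rw [ih d id]
      simp [extNew, hm]
    · have hcf : d.contains n = false := by simpa using hc
      have hm : n ∉ d.keys := fun h => hc ((PySem.Dict.contains_iff_mem_keys d n).mpr h)
      have hins : d.insert n id = PySem.Dict.mk (d.items ++ [(n, id)]) := by
        apply PySem.Dict.ext
        simp [PySem.Dict.items_insert, hcf]
      rw [if_pos (by simp [hcf])]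
      rw [ih (d.insert n id) (id + 1)]
      have hkeys : (d.insert n id).keys = d.keys ++ [n] := by
        rw [hins]; simp [PySem.Dict.keys]
      rw [hkeys, hins]
      simp only [Prod.mk.injEq]
      have hext : extNew d.keys (n :: rest) = n :: extNew (d.keys ++ [n]) rest := by
        simp [extNew, hm]
      rw [hext, addIds_cons]
      refine ⟨by simp [PySem.Dict.keys], by simp only [List.length_cons]; push_cast; omega⟩

theorem link :
    ∀ (cs u s : List String),
      (∀ n ∈ cs, u.contains n = (s.contains n || KNOWN_CLASS_ORDER.contains n)) →
      extNew u cs = newUnknown s cs := by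
  intro cs
  induction cs with
  | nil => intro u s _; simp [extNew, newUnknown]
  | cons n rest ih =>
    intro u s h
    have hn := h n (by simp)
    have hr : ∀ m ∈ rest, u.contains m = (s.contains m || KNOWN_CLASS_ORDER.contains m) :=
      fun m hm => h m (List.mem_cons_of_mem _ hm)
    by_cases hs : n ∈ s
    · have hu : u.contains n = true := by rw [hn]; simp [hs]
      simp only [extNew, newUnknown]
      rw [if_pos hu, if_pos (by simpa using hs)]
      exact ih u s hr
    · by_cases hK : n ∈ KNOWN_CLASS_ORDER
      · have hu : u.contains n = true := by rw [hn]; simp [hs, hK]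
        simp only [extNew, newUnknown]
        rw [if_pos hu, if_neg (by simpa using hs), if_pos (by simpa using hK)]
        apply ih u (s ++ [n])
        intro m hm
        rw [hr m hm]
        by_cases hmn : m = n
        · subst hmn; simp [hK]
        · simp [hmn]
      · have hu : u.contains n = false := by rw [hn]; simp [hs, hK]
        simp only [extNew, newUnknown]
        rw [if_neg (by simpa using hu), if_neg (by simpa using hs), if_neg (by simpa using hK)]
        congr 1
        apply ih (u ++ [n]) (s ++ [n])
        intro m hm
        by_cases hmn : m = n
        · subst hmn; simp
        · rw [show (u ++ [n]).contains m = u.contains m from by simp [hmn],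
              show (s ++ [n]).contains m = s.contains m from by simp [hmn]]
          exact hr m hm

theorem updFilter :
    ∀ (cs seen : List String),
      (PySem.Set.update seen cs).filter (fun n => !KNOWN_CLASS_ORDER.contains n)
      = seen.filter (fun n => !KNOWN_CLASS_ORDER.contains n) ++ newUnknown seen cs := by
  intro cs
  induction cs with
  | nil => intro seen; simp [newUnknown, PySem.Set.update]
  | cons n rest ih =>
    intro seen
    rw [PySem.Set.update_cons]
    by_cases hs : n ∈ seen
    · rw [PySem.Set.add_of_mem hs, ih seen]
      simp only [newUnknown]
      rw [if_pos (by simpa using hs)]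
    · rw [PySem.Set.add_of_not_mem hs, ih (seen ++ [n])]
      by_cases hK : n ∈ KNOWN_CLASS_ORDER
      · simp only [newUnknown]
        rw [if_neg (by simpa using hs), if_pos (by simpa using hK)]
        simp [List.filter_append, hK]
      · simp only [newUnknown]
        rw [if_neg (by simpa using hs), if_neg (by simpa using hK)]
        simp [List.filter_append, hK]

-- ===== the stable sort in B, characterised as seven key blocks =====

def blk (xs : List String) (v : Int) : List String := xs.filter (fun n => order_key n == v)

def catBlk (xs : List String) (vs : List Int) : List String := vs.flatMap (blk xs)

def blocks (xs : List String) : List String := catBlk xs [0, 1, 2, 3, 4, 5, 6]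

theorem mem_blk {a : String} {xs : List String} {v : Int} (h : a ∈ blk xs v) :
    order_key a = v := by
  have := (List.mem_filter.mp h).2
  simpa using this

theorem mem_catBlk {a : String} {xs : List String} {vs : List Int} (h : a ∈ catBlk xs vs) :
    order_key a ∈ vs := by
  simp only [catBlk, List.mem_flatMap] at h
  obtain ⟨v, hv, ha⟩ := h
  rw [mem_blk ha]; exact hv

theorem catBlk_append (xs : List String) (l1 l2 : List Int) :
    catBlk xs (l1 ++ l2) = catBlk xs l1 ++ catBlk xs l2 := by
  simp [catBlk, List.flatMap_append]

theorem order_key_bounds (n : String) : 0 ≤ order_key n ∧ order_key n ≤ 6 := by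
  unfold order_key
  cases h : PySem.List.index? KNOWN_CLASS_ORDER n with
  | none => simp
  | some k =>
    obtain ⟨pre, suf, hsplit, hlen, -⟩ := (PySem.List.index?_eq_some_iff _ _ _).mp h
    have h6 : pre.length + (suf.length + 1) = 6 := by
      have := congrArg List.length hsplit
      simpa [KNOWN_CLASS_ORDER] using this.symm
    simp only []
    omega

theorem blk_snoc (xs : List String) (x : String) (v : Int) :
    blk (xs ++ [x]) v = blk xs v ++ (if order_key x == v then [x] else []) := by
  simp [blk, List.filter_append, List.filter_cons]

theorem insertBy_skip (bef : String → String → Bool) (x : String) :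
    ∀ (as bs : List String), (∀ a ∈ as, bef x a = false) →
      PySem.List.insertBy bef x (as ++ bs) = as ++ PySem.List.insertBy bef x bs := by
  intro as
  induction as with
  | nil => intro bs _; simp
  | cons a rest ih =>
    intro bs h
    have ha : bef x a = false := h a (by simp)
    have ih' := ih bs (fun a' ha' => h a' (by simp [ha']))
    have step : PySem.List.insertBy bef x (a :: (rest ++ bs))
        = if bef x a = true then x :: a :: (rest ++ bs)
          else a :: PySem.List.insertBy bef x (rest ++ bs) := rfl
    simp only [List.cons_append, step, ha, Bool.false_eq_true, if_false, ih']

theorem insertBy_head (bef : String → String → Bool) (x : String) (bs : List String)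
    (h : ∀ b ∈ bs, bef x b = true) :
    PySem.List.insertBy bef x bs = x :: bs := by
  cases bs with
  | nil => rfl
  | cons b rest => simp [PySem.List.insertBy, h b (by simp)]

theorem insert_mid (x : String) (pre suf : List String)
    (hpre : ∀ a ∈ pre, order_key a ≤ order_key x)
    (hsuf : ∀ b ∈ suf, order_key x < order_key b) :
    PySem.List.insertBy (fun a b => decide (order_key a < order_key b)) x (pre ++ suf)
      = pre ++ x :: suf := by
  rw [insertBy_skip _ _ pre suf (fun a ha => by simp [not_lt.mpr (hpre a ha)]),
      insertBy_head _ _ suf (fun b hb => by simp [hsuf b hb])]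

theorem blocks_sorted : ∀ xs : List String,
    PySem.List.sorted xs order_key = blocks xs := by
  intro xs
  induction xs using List.reverseRecOn with
  | nil =>
    rw [PySem.List.sorted_eq_foldl_insertBy]
    simp [blocks, catBlk, blk]
  | append_singleton xs x ih =>
    rw [PySem.List.sorted_eq_foldl_insertBy] at ih ⊢
    rw [List.foldl_append, List.foldl_cons, List.foldl_nil, ih]
    have hb := order_key_bounds x
    rcases (by omega : order_key x = 0 ∨ order_key x = 1 ∨ order_key x = 2 ∨ order_key x = 3 ∨
        order_key x = 4 ∨ order_key x = 5 ∨ order_key x = 6) with h|h|h|h|h|h|h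
    · have e : blocks xs = catBlk xs [0] ++ catBlk xs [1, 2, 3, 4, 5, 6] := by
        rw [blocks, show ([0, 1, 2, 3, 4, 5, 6] : List Int) = [0] ++ [1, 2, 3, 4, 5, 6] from rfl,
          catBlk_append]
      rw [e, insert_mid x _ _
          (fun a ha => by have := mem_catBlk ha; simp at this; omega)
          (fun b hb => by have := mem_catBlk hb; simp at this; omega)]
      simp [blocks, catBlk, blk_snoc, h]
    · have e : blocks xs = catBlk xs [0, 1] ++ catBlk xs [2, 3, 4, 5, 6] := by
        rw [blocks, show ([0, 1, 2, 3, 4, 5, 6] : List Int) = [0, 1] ++ [2, 3, 4, 5, 6] from rfl,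
          catBlk_append]
      rw [e, insert_mid x _ _
          (fun a ha => by have := mem_catBlk ha; simp at this; omega)
          (fun b hb => by have := mem_catBlk hb; simp at this; omega)]
      simp [blocks, catBlk, blk_snoc, h]
    · have e : blocks xs = catBlk xs [0, 1, 2] ++ catBlk xs [3, 4, 5, 6] := by
        rw [blocks, show ([0, 1, 2, 3, 4, 5, 6] : List Int) = [0, 1, 2] ++ [3, 4, 5, 6] from rfl,
          catBlk_append]
      rw [e, insert_mid x _ _
          (fun a ha => by have := mem_catBlk ha; simp at this; omega)
          (fun b hb => by have := mem_catBlk hb; simp at this; omega)]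
      simp [blocks, catBlk, blk_snoc, h]
    · have e : blocks xs = catBlk xs [0, 1, 2, 3] ++ catBlk xs [4, 5, 6] := by
        rw [blocks, show ([0, 1, 2, 3, 4, 5, 6] : List Int) = [0, 1, 2, 3] ++ [4, 5, 6] from rfl,
          catBlk_append]
      rw [e, insert_mid x _ _
          (fun a ha => by have := mem_catBlk ha; simp at this; omega)
          (fun b hb => by have := mem_catBlk hb; simp at this; omega)]
      simp [blocks, catBlk, blk_snoc, h]
    · have e : blocks xs = catBlk xs [0, 1, 2, 3, 4] ++ catBlk xs [5, 6] := by
        rw [blocks, show ([0, 1, 2, 3, 4, 5, 6] : List Int) = [0, 1, 2, 3, 4] ++ [5, 6] from rfl,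
          catBlk_append]
      rw [e, insert_mid x _ _
          (fun a ha => by have := mem_catBlk ha; simp at this; omega)
          (fun b hb => by have := mem_catBlk hb; simp at this; omega)]
      simp [blocks, catBlk, blk_snoc, h]
    · have e : blocks xs = catBlk xs [0, 1, 2, 3, 4, 5] ++ catBlk xs [6] := by
        rw [blocks, show ([0, 1, 2, 3, 4, 5, 6] : List Int) = [0, 1, 2, 3, 4, 5] ++ [6] from rfl,
          catBlk_append]
      rw [e, insert_mid x _ _
          (fun a ha => by have := mem_catBlk ha; simp at this; omega)
          (fun b hb => by have := mem_catBlk hb; simp at this; omega)]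
      simp [blocks, catBlk, blk_snoc, h]
    · have e : blocks xs = catBlk xs [0, 1, 2, 3, 4, 5, 6] ++ catBlk xs [] := by
        simp [blocks, catBlk]
      rw [e, insert_mid x _ _
          (fun a ha => by have := mem_catBlk ha; simp at this; omega)
          (fun b hb => by have := mem_catBlk hb; simp at this)]
      simp [blocks, catBlk, blk_snoc, h]

theorem order_key_char (n : String) (v : Nat) (hv : v < 6) :
    order_key n = (v : Int) ↔ n = KNOWN_CLASS_ORDER[v]'(by simp [KNOWN_CLASS_ORDER]; omega) := by
  unfold order_key
  cases h : PySem.List.index? KNOWN_CLASS_ORDER n with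
  | none =>
    have hnm : n ∉ KNOWN_CLASS_ORDER := by
      rw [PySem.List.index?_eq_idxOf?] at h
      exact List.idxOf?_eq_none_iff.mp h
    simp only []
    constructor
    · intro h6; omega
    · intro he; exact absurd (he ▸ List.getElem_mem _) hnm
  | some k =>
    obtain ⟨pre, suf, hsplit, hlen, -⟩ := (PySem.List.index?_eq_some_iff _ _ _).mp h
    have h6 : pre.length + (suf.length + 1) = 6 := by
      have := congrArg List.length hsplit
      simpa [KNOWN_CLASS_ORDER] using this.symm
    have hk6 : k < 6 := by omega
    have hgk : KNOWN_CLASS_ORDER[k]'(by simp [KNOWN_CLASS_ORDER]; omega) = n := by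
      rw [List.getElem_of_eq hsplit]
      rw [List.getElem_append_right (by omega)]
      simp [hlen]
    simp only []
    constructor
    · intro he
      have hkv : k = v := by exact_mod_cast he
      subst hkv
      exact hgk.symm
    · intro he
      have hnd : KNOWN_CLASS_ORDER.Nodup := by decide
      have : KNOWN_CLASS_ORDER[k]'(by simp [KNOWN_CLASS_ORDER]; omega)
          = KNOWN_CLASS_ORDER[v]'(by simp [KNOWN_CLASS_ORDER]; omega) := by rw [hgk, he]
      have := (hnd.getElem_inj_iff).mp this
      exact_mod_cast congrArg (Nat.cast : Nat → Int) this

theorem order_key_eq_six_iff (n : String) : order_key n = 6 ↔ n ∉ KNOWN_CLASS_ORDER := by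
  unfold order_key
  cases h : PySem.List.index? KNOWN_CLASS_ORDER n with
  | none =>
    have hnm : n ∉ KNOWN_CLASS_ORDER := by
      rw [PySem.List.index?_eq_idxOf?] at h
      exact List.idxOf?_eq_none_iff.mp h
    simp [hnm]
  | some k =>
    obtain ⟨pre, suf, hsplit, hlen, -⟩ := (PySem.List.index?_eq_some_iff _ _ _).mp h
    have h6 : pre.length + (suf.length + 1) = 6 := by
      have := congrArg List.length hsplit
      simpa [KNOWN_CLASS_ORDER] using this.symm
    have hmem : n ∈ KNOWN_CLASS_ORDER := by rw [hsplit]; simp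
    simp only []
    constructor
    · intro hx; omega
    · intro hx; exact absurd hmem hx

theorem blk_known (cn : List String) (v : Nat) (hv : v < 6) :
    blk (PySem.List.dedup cn) v
      = if cn.contains (KNOWN_CLASS_ORDER[v]'(by simp [KNOWN_CLASS_ORDER]; omega))
        then [KNOWN_CLASS_ORDER[v]'(by simp [KNOWN_CLASS_ORDER]; omega)] else [] := by
  have hf : blk (PySem.List.dedup cn) v
      = (PySem.List.dedup cn).filter
          (fun n => n == KNOWN_CLASS_ORDER[v]'(by simp [KNOWN_CLASS_ORDER]; omega)) := by
    apply List.filter_congr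
    intro n _
    rw [Bool.eq_iff_iff]
    simp [order_key_char n v hv]
  rw [hf, List.filter_beq]
  by_cases hm : KNOWN_CLASS_ORDER[v]'(by simp [KNOWN_CLASS_ORDER]; omega) ∈ cn
  · have : KNOWN_CLASS_ORDER[v]'(by simp [KNOWN_CLASS_ORDER]; omega) ∈ PySem.List.dedup cn :=
      (PySem.List.mem_dedup _ _).mpr hm
    rw [List.count_eq_one_of_mem (PySem.List.nodup_dedup cn) this]
    simp [hm]
  · have : KNOWN_CLASS_ORDER[v]'(by simp [KNOWN_CLASS_ORDER]; omega) ∉ PySem.List.dedup cn :=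
      fun hc => hm ((PySem.List.mem_dedup _ _).mp hc)
    rw [List.count_eq_zero_of_not_mem this]
    simp [hm]

theorem blk_six (cn : List String) :
    blk (PySem.List.dedup cn) 6 = newUnknown [] cn := by
  have hf : blk (PySem.List.dedup cn) 6
      = (PySem.List.dedup cn).filter (fun n => !KNOWN_CLASS_ORDER.contains n) := by
    apply List.filter_congr
    intro n _
    rw [Bool.eq_iff_iff]
    simp [order_key_eq_six_iff n]
  rw [hf]
  have := updFilter cn []
  simpa [PySem.Set.update_nil_left] using this

theorem sorted_dedup_eq (cn : List String) :
    PySem.List.sorted (PySem.List.dedup cn) order_key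
      = KNOWN_CLASS_ORDER.filter (fun k => cn.contains k) ++ newUnknown [] cn := by
  rw [blocks_sorted]
  have h0 := blk_known cn 0 (by omega)
  have h1 := blk_known cn 1 (by omega)
  have h2 := blk_known cn 2 (by omega)
  have h3 := blk_known cn 3 (by omega)
  have h4 := blk_known cn 4 (by omega)
  have h5 := blk_known cn 5 (by omega)
  have h6 := blk_six cn
  simp only [KNOWN_CLASS_ORDER, List.getElem_cons_zero, List.getElem_cons_succ,
    Nat.cast_ofNat, Nat.cast_zero, Nat.cast_one] at h0 h1 h2 h3 h4 h5
  simp only [blocks, catBlk, List.flatMap_cons, List.flatMap_nil, List.append_nil,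
    h0, h1, h2, h3, h4, h5, h6, KNOWN_CLASS_ORDER, List.filter_cons, List.filter_nil]
  split_ifs <;> simp

-- ===== VERDICT (by name: the statement is the Claim_ definition above) =====
theorem build_class_mapping_spec : Claim_equal_build_class_mapping := by
  unfold Claim_equal_build_class_mapping
  intro cn _
  unfold Spec_build_class_mapping build_class_mapping build_class_mapping_alt
  simp only []
  have hfree : ∀ k ∈ KNOWN_CLASS_ORDER, (PySem.Dict.empty : PySem.Dict String Int).contains k = false := by
    intro k _; simp [PySem.Dict.contains_empty]
  rw [phase1 cn KNOWN_CLASS_ORDER PySem.Dict.empty 1 (by decide) hfree]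
  have hemp : (PySem.Dict.empty : PySem.Dict String Int).items = [] := rfl
  rw [hemp, List.nil_append]
  set P := KNOWN_CLASS_ORDER.filter (fun k => cn.contains k) with hP
  rw [phase2 cn (PySem.Dict.mk (addIds P 1)) (1 + P.length)]
  have hkeys : (PySem.Dict.mk (addIds P 1)).keys = P := by
    simp [PySem.Dict.keys, map_fst_addIds]
  rw [hkeys]
  have hlink : extNew P cn = newUnknown [] cn := by
    apply link cn P []
    intro n hn
    have hPn : P.contains n = KNOWN_CLASS_ORDER.contains n := by
      by_cases hK : n ∈ KNOWN_CLASS_ORDER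
      · have : n ∈ P := by rw [hP]; simp [List.mem_filter, hK, hn]
        simp [this, hK]
      · have : n ∉ P := by rw [hP]; simp [List.mem_filter, hK]
        simp [this, hK]
    rw [hPn]; simp
  rw [hlink]
  show (PySem.Dict.mk _).items = _
  rw [sorted_dedup_eq cn, ← hP]
  show addIds P 1 ++ addIds (newUnknown [] cn) (1 + ↑P.length)
      = addIds (P ++ newUnknown [] cn) 1
  rw [addIds, addIds, addIds, PySem.List.enumerate_append]
  simp
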